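-- pv_equiv track=rewrite | github.com/TomGn1/Python_Lessons | adressageip.py | masque_valide
-- ===== SOURCE A (Python) =====
-- liste_octets = [0, 128, 192, 224, 240, 248, 252, 254, 255]
--
-- def masque_valide(octs):
--     if len(octs) != 4 or any(o not in range(256) for o in octs):
--         return False
--     seen_drop = False
--     for o in octs:
--         if o not in liste_octets:
--             return False
--         if seen_drop and o != 0:
--             return False
--         if o != 255:
--             seen_drop = True
--     return True
-- ===== SOURCE B (Python) =====
-- def _make_valid_masks():
--     masks = set()
--     for prefix in range(33):
--         m = (0xffffffff << (32 - prefix)) & 0xffffffff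
--         masks.add(((m >> 24) & 255, (m >> 16) & 255, (m >> 8) & 255, m & 255))
--     return masks
--
-- valid_masks = _make_valid_masks()
--
-- def masque_valide(octs):
--     if len(octs) != 4 or any(o not in range(256) for o in octs):
--         return False
--     return tuple(octs) in valid_masks
-- ===== Notes on version B (the rewrite author's own statement) =====
-- stated objective: simpler
-- what changed: Replaces the per-octet seen_drop state machine by a single membership test of the 4-tuple in a precomputed set of the 33 valid subnet masks (one per prefix length 0..32).
import Mathlib
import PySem

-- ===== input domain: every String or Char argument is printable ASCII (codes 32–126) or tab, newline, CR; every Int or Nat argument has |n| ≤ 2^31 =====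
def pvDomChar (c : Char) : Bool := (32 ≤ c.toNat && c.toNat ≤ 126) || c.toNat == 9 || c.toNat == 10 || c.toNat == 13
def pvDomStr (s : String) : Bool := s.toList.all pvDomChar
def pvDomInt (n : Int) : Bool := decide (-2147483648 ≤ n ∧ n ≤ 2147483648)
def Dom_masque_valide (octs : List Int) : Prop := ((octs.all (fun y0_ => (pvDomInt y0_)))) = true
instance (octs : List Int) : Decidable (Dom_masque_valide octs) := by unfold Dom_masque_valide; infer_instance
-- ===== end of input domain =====

-- B replaces A's seen_drop state machine by membership of the 4-tuple in the precomputed set of the 33 valid masks (simpler; return value only, no side effects).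

-- ===== PORT A =====
def listeOctets : List Int := [0, 128, 192, 224, 240, 248, 252, 254, 255]

-- the for-loop of A with its seen_drop accumulator
def maskLoop : List Int → Bool → Bool
  | [], _ => true
  | o :: rest, seen =>
    if !(listeOctets.contains o) then false
    else if seen && !(o == 0) then false
    else maskLoop rest (if !(o == 255) then true else seen)

def masque_valide (octs : List Int) : Bool :=
  if (octs.length != 4) || octs.any (fun o => !(decide (0 ≤ o ∧ o < 256))) then false
  else maskLoop octs false

-- ===== PORT B =====
-- valid_masks = _make_valid_masks(): a Python set built by .add in a loop over range(33)
def validMasks : PySem.Set (Int × Int × Int × Int) :=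
  (PySem.List.pyRange 0 33 1).foldl (fun s p =>
    let m : Int := PySem.Int.band (4294967295 <<< (32 - p).toNat) 4294967295
    PySem.Set.add s
      (PySem.Int.band (m >>> (24 : Nat)) 255, PySem.Int.band (m >>> (16 : Nat)) 255,
       PySem.Int.band (m >>> (8 : Nat)) 255, PySem.Int.band m 255))
    PySem.Set.empty

def masque_valide_alt (octs : List Int) : Bool :=
  if (octs.length != 4) || octs.any (fun o => !(decide (0 ≤ o ∧ o < 256))) then false
  else match octs with
    | [a, b, c, d] => PySem.Set.contains validMasks (a, b, c, d)
    | _ => false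

-- ===== PRECONDITION & SPEC =====
def Spec_masque_valide (octs : List Int) (out : Bool) : Prop := out = masque_valide_alt octs
instance (octs : List Int) (out : Bool) : Decidable (Spec_masque_valide octs out) := by unfold Spec_masque_valide; infer_instance

-- ===== CLAIM (what is proved, stated in full; the proofs are below) =====
def Claim_equal_masque_valide : Prop := ∀ (octs : List Int), Dom_masque_valide octs → Spec_masque_valide octs (masque_valide octs)

-- ===== LEMMAS AND PROOFS =====

-- the precomputed set, evaluated
set_option maxHeartbeats 1000000 in
theorem validMasks_eval : validMasks = [(0, 0, 0, 0), (128, 0, 0, 0), (192, 0, 0, 0), (224, 0, 0, 0), (240, 0, 0, 0), (248, 0, 0, 0), (252, 0, 0, 0), (254, 0, 0, 0), (255, 0, 0, 0), (255, 128, 0, 0), (255, 192, 0, 0), (255, 224, 0, 0), (255, 240, 0, 0), (255, 248, 0, 0), (255, 252, 0, 0), (255, 254, 0, 0), (255, 255, 0, 0), (255, 255, 128, 0), (255, 255, 192, 0), (255, 255, 224, 0), (255, 255, 240, 0), (255, 255, 248, 0), (255, 255, 252, 0), (255, 255, 254, 0), (255, 255, 255, 0), (255, 255, 255, 128), (255,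 255, 255, 192), (255, 255, 255, 224), (255, 255, 255, 240), (255, 255, 255, 248), (255, 255, 255, 252), (255, 255, 255, 254), (255, 255, 255, 255)] := by decide

-- every component of a valid mask is one of the nine mask octets
theorem mem_validMasks_components (a b c d : Int) (h : (a, b, c, d) ∈ validMasks) :
    (listeOctets.contains a && listeOctets.contains b && listeOctets.contains c && listeOctets.contains d) = true := by
  have key : validMasks.all (fun t => listeOctets.contains t.1 && listeOctets.contains t.2.1 &&
      listeOctets.contains t.2.2.1 && listeOctets.contains t.2.2.2) = true := by
    rw [validMasks_eval]; decide
  simpa using (List.all_eq_true.mp key) _ h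

-- A's loop fails as soon as an octet is outside listeOctets (or earlier)
set_option maxHeartbeats 2000000 in
theorem maskLoop_false_of_bad (a b c d : Int) (seen : Bool)
    (h : (listeOctets.contains a && listeOctets.contains b && listeOctets.contains c && listeOctets.contains d) = false) :
    maskLoop [a, b, c, d] seen = false := by
  simp only [maskLoop]
  split_ifs <;> simp_all

-- on the 9^4 tuples of mask octets the two computations agree (finite check)
set_option maxHeartbeats 4000000 in
theorem maskLoop_eq_contains_of_good (a b c d : Int)
    (ha : a ∈ listeOctets) (hb : b ∈ listeOctets) (hc : c ∈ listeOctets) (hd : d ∈ listeOctets) :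
    maskLoop [a, b, c, d] false = PySem.Set.contains validMasks (a, b, c, d) := by
  have key : (listeOctets.all fun a => listeOctets.all fun b => listeOctets.all fun c =>
      listeOctets.all fun d => maskLoop [a, b, c, d] false == PySem.Set.contains validMasks (a, b, c, d)) = true := by
    rw [validMasks_eval]; decide
  simp only [List.all_eq_true, beq_iff_eq] at key
  exact key a ha b hb c hc d hd

-- ===== VERDICT (by name: the statement is the Claim_ definition above) =====
theorem masque_valide_spec : Claim_equal_masque_valide := by
  intro octs _
  unfold Spec_masque_valide masque_valide masque_valide_alt
  by_cases hg : ((octs.length != 4) || octs.any (fun o => !(decide (0 ≤ o ∧ o < 256)))) = true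
  · rw [if_pos hg, if_pos hg]
  · rw [if_neg hg, if_neg hg]
    have hlen : octs.length = 4 := by
      by_contra h
      exact hg (by simp [h])
    match octs, hlen with
    | [a, b, c, d], _ =>
      show maskLoop [a, b, c, d] false = PySem.Set.contains validMasks (a, b, c, d)
      by_cases hm : (listeOctets.contains a && listeOctets.contains b && listeOctets.contains c && listeOctets.contains d) = true
      · simp only [Bool.and_eq_true, List.contains_iff_mem] at hm
        exact maskLoop_eq_contains_of_good a b c d hm.1.1.1 hm.1.1.2 hm.1.2 hm.2
      · rw [maskLoop_false_of_bad a b c d false (Bool.eq_false_iff.mpr hm)]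
        cases hcv : PySem.Set.contains validMasks (a, b, c, d) with
        | false => rfl
        | true =>
          exact absurd (mem_validMasks_components a b c d ((PySem.Set.contains_iff _ _).mp hcv)) hm
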